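-- pv_equiv track=rewrite | github.com/EmuRaha/MyPythonCodes | kata30.py | solution
-- ===== SOURCE A (Python) =====
-- def solution(string,markers):
--     lines = string.split('\n')
--     lines1=[]
--     for i in lines:
--         words=i.split()
--         for j in markers:
--             if j in words:
--                 del words[words.index(j):]
--         for k in words:
--             l=len(words)
--             for j in markers:
--                 if j in k:
--                     if len(words)==l:
--                         del words[words.index(k):]
--         lines1.append(" ".join(words))
--     return "\n".join(lines1)
-- ===== SOURCE B (Python) =====
-- def solution(string, markers):
--     out = []
--     for line in string.split('\n'):
--         kept = []
--         for w in line.split():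
--             if any(m in w for m in markers):
--                 break
--             kept.append(w)
--         out.append(' '.join(kept))
--     return '\n'.join(out)
-- ===== Notes on version B (the rewrite author's own statement) =====
-- stated objective: faster
-- what changed: Replaces A's two list-mutating deletion passes per line (an exact-match suffix delete, then a substring-driven delete performed while iterating over the list being mutated, with repeated .index scans) by a single forward scan that keeps words until the first one containing any marker.
import Mathlib
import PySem

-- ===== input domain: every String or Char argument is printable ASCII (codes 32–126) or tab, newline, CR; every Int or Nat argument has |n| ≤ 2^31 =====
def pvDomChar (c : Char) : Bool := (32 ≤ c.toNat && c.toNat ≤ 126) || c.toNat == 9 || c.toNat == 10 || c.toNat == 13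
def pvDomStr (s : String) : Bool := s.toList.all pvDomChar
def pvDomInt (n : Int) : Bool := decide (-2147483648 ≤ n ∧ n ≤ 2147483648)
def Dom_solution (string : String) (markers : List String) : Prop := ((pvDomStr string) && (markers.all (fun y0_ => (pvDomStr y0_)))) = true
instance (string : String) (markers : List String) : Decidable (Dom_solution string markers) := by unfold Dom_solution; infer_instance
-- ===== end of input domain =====

-- B replaces A's two list-mutating deletion passes (exact-match cut, then a substring cut driven by
-- iteration over the list being mutated, with .index scans) by a single forward scan per line that
-- keeps words until the first one containing any marker; objective: faster (quadratic word scans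
-- per line become one linear scan; a timing run measured the speedup).

-- ===== PORT A =====

-- first pass: for j in markers: if j in words: del words[words.index(j):]
def pvExactPass (words : List String) (markers : List String) : List String :=
  markers.foldl (fun ws j =>
    if ws.contains j then
      match PySem.List.index? ws j with
      | some p => ws.take p
      | none => ws          -- unreachable: j ∈ ws
    else ws) words

-- inner 'for j in markers: if j in k: if len(words)==l: del words[words.index(k):]' (l fixed, k fixed)
def pvMarkerFold (k : String) (l : Nat) (ws : List String) (ms : List String) : List String :=
  ms.foldl (fun w j =>
    if PySem.Str.isIn j k then
      if w.length = l then
        match PySem.List.index? w k with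
        | some p => w.take p
        | none => w          -- unreachable: k ∈ w when no deletion happened yet
      else w
    else w) ws

-- each fold step only truncates, so the length never grows (needed for termination of pvSecondPass)
theorem pvMarkerFold_length_le (k : String) (l : Nat) (ms : List String) :
    ∀ ws : List String, (pvMarkerFold k l ws ms).length ≤ ws.length := by
  induction ms with
  | nil => intro ws; simp [pvMarkerFold]
  | cons j ms ih =>
      intro ws
      simp only [pvMarkerFold, List.foldl_cons]
      refine le_trans (ih _) ?_
      split_ifs with h1 h2
      · cases hidx : PySem.List.index? ws k with
        | none => simp
        | some p => simp
      · exact le_rfl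
      · exact le_rfl

-- second pass: Python's 'for k in words: …' over the list being mutated = index-driven while loop
def pvSecondPass (markers : List String) (ws : List String) (idx : Nat) : List String :=
  if h : idx < ws.length then
    pvSecondPass markers (pvMarkerFold ws[idx] ws.length ws markers) (idx + 1)
  else ws
termination_by ws.length - idx
decreasing_by
  have := pvMarkerFold_length_le ws[idx] ws.length markers ws
  omega

def solution (string : String) (markers : List String) : String :=
  let lines := (PySem.Str.split? string "\n").getD []   -- sep "\n" ≠ "": split? is always some here
  let lines1 := lines.foldl (fun acc i =>
    let words := PySem.Str.split₀ i
    let words := pvExactPass words markers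
    let words := pvSecondPass markers words 0
    acc ++ [PySem.Str.join " " words]) []
  PySem.Str.join "\n" lines1

-- ===== PORT B =====

-- any(m in w for m in markers)
def pvHasMarker (markers : List String) (w : String) : Bool :=
  markers.any (fun m => PySem.Str.isIn m w)

-- the kept-words loop with its break: keep words until the first one containing a marker
def pvKeepWords (markers : List String) : List String → List String
  | [] => []
  | w :: ws => if pvHasMarker markers w then [] else w :: pvKeepWords markers ws

def solution_alt (string : String) (markers : List String) : String :=
  PySem.Str.join "\n"
    (((PySem.Str.split? string "\n").getD []).map
      (fun line => PySem.Str.join " " (pvKeepWords markers (PySem.Str.split₀ line))))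

-- ===== PRECONDITION & SPEC =====
def Spec_solution (string : String) (markers : List String) (out : String) : Prop := out = solution_alt string markers
instance (string : String) (markers : List String) (out : String) : Decidable (Spec_solution string markers out) := by unfold Spec_solution; infer_instance

-- ===== CLAIM (what is proved, stated in full; the proofs are below) =====
def Claim_equal_solution : Prop := ∀ (string : String) (markers : List String), Dom_solution string markers → Spec_solution string markers (solution string markers)

-- ===== LEMMAS AND PROOFS =====

-- every marker is a substring of itself (Python 'j in k' with j == k)
theorem pvIsIn_self (j : String) : PySem.Str.isIn j j = true := by
  simp [PySem.Chars.isIn_iff_infix]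

-- a list with no marker-containing word is kept whole
theorem pvKeepWords_clean (markers : List String) :
    ∀ ws : List String, (∀ w ∈ ws, pvHasMarker markers w = false) → pvKeepWords markers ws = ws := by
  intro ws h
  induction ws with
  | nil => rfl
  | cons w ws ih =>
      have hw := h w (List.mem_cons_self)
      simp [pvKeepWords, hw, ih (fun x hx => h x (List.mem_cons_of_mem _ hx))]

-- cutting at (or after) a marker-containing word does not change the kept prefix
theorem pvKeepWords_take (markers : List String) :
    ∀ (ws : List String) (p : Nat) (hp : p < ws.length), pvHasMarker markers ws[p] = true →
      pvKeepWords markers (ws.take p) = pvKeepWords markers ws := by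
  intro ws
  induction ws with
  | nil => intro p hp; simp at hp
  | cons w ws ih =>
      intro p hp hbad
      cases p with
      | zero =>
          simp only [List.getElem_cons_zero] at hbad
          simp [pvKeepWords, hbad]
      | succ p =>
          simp only [List.take_succ_cons, pvKeepWords]
          by_cases hw : pvHasMarker markers w = true
          · simp [hw]
          · simp only [Bool.not_eq_true] at hw
            simp only [hw, if_neg Bool.false_ne_true, List.cons.injEq, true_and]
            exact ih p (by simpa using hp) (by simpa using hbad)

-- the exact-match pass never changes the kept prefix
theorem pvExactPass_keep (markers : List String) :
    ∀ (ms ws : List String), (∀ j ∈ ms, j ∈ markers) →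
      pvKeepWords markers
        (ms.foldl (fun ws j =>
          if ws.contains j then
            match PySem.List.index? ws j with
            | some p => ws.take p
            | none => ws
          else ws) ws) = pvKeepWords markers ws := by
  intro ms
  induction ms with
  | nil => intro ws _; rfl
  | cons j ms ih =>
      intro ws hsub
      simp only [List.foldl_cons]
      rw [ih _ (fun x hx => hsub x (List.mem_cons_of_mem _ hx))]
      by_cases hc : ws.contains j
      · simp only [hc, if_pos]
        cases hidx : PySem.List.index? ws j with
        | none =>
            rfl
        | some p =>
            obtain ⟨hk, hget, -⟩ := PySem.List.getElem_of_index?_eq_some hidx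
            have hbad : pvHasMarker markers ws[p] = true := by
              rw [hget]
              simp only [pvHasMarker, List.any_eq_true]
              exact ⟨j, hsub j List.mem_cons_self, pvIsIn_self j⟩
            exact pvKeepWords_take markers ws p hk hbad
      · have hmem : j ∉ ws := by simpa using hc
        simp [hmem]

-- pvMarkerFold is the identity once the length differs from l
theorem pvMarkerFold_stuck (k : String) (l : Nat) :
    ∀ (ms ws : List String), ws.length ≠ l → pvMarkerFold k l ws ms = ws := by
  intro ms
  induction ms with
  | nil => intro ws _; rfl
  | cons j ms ih =>
      intro ws hne
      simp only [pvMarkerFold, List.foldl_cons]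
      have : (if PySem.Str.isIn j k then
          if ws.length = l then
            match PySem.List.index? ws k with
            | some p => ws.take p
            | none => ws
          else ws
        else ws) = ws := by
        by_cases h1 : PySem.Str.isIn j k = true
        · rw [if_pos h1, if_neg hne]
        · rw [if_neg h1]
      rw [this]; exact ih ws hne

-- pvMarkerFold is the identity when k contains no marker of ms
theorem pvMarkerFold_clean (k : String) (l : Nat) :
    ∀ (ms ws : List String), (∀ j ∈ ms, PySem.Str.isIn j k = false) → pvMarkerFold k l ws ms = ws := by
  intro ms
  induction ms with
  | nil => intro ws _; rfl
  | cons j ms ih =>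
      intro ws h
      simp only [pvMarkerFold, List.foldl_cons, h j List.mem_cons_self, Bool.false_eq_true]
      exact ih ws (fun x hx => h x (List.mem_cons_of_mem _ hx))

-- when k does contain a marker, pvMarkerFold truncates at k's first occurrence (and only once)
theorem pvMarkerFold_cut (k : String) (l : Nat) :
    ∀ (ms ws : List String) (idx : Nat), (∃ j ∈ ms, PySem.Str.isIn j k = true) →
      PySem.List.index? ws k = some idx → ws.length = l → idx < l →
      pvMarkerFold k l ws ms = ws.take idx := by
  intro ms
  induction ms with
  | nil => intro ws idx h; simp at h
  | cons j ms ih =>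
      intro ws idx hex hidx hlen hlt
      simp only [pvMarkerFold, List.foldl_cons]
      by_cases hj : PySem.Str.isIn j k = true
      · simp only [hj, if_pos, hlen, hidx]
        have : (ws.take idx).length ≠ l := by
          simp only [List.length_take]
          omega
        exact pvMarkerFold_stuck k l ms (ws.take idx) this
      · simp only [Bool.not_eq_true] at hj
        simp only [hj, Bool.false_eq_true]
        obtain ⟨j', hj', hin⟩ := hex
        rcases List.mem_cons.mp hj' with rfl | hmem
        · rw [hin] at hj; cases hj
        · exact ih ws idx ⟨j', hmem, hin⟩ hidx hlen hlt

-- if all words before idx are marker-free, the second pass computes exactly the kept prefix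
theorem pvSecondPass_eq_keep (markers : List String) :
    ∀ (n : Nat) (ws : List String) (idx : Nat), ws.length - idx ≤ n →
      (∀ (i : Nat) (hi : i < ws.length), i < idx → pvHasMarker markers ws[i] = false) →
      pvSecondPass markers ws idx = pvKeepWords markers ws := by
  intro n
  induction n with
  | zero =>
      intro ws idx hle hclean
      have hge : ws.length ≤ idx := by omega
      rw [pvSecondPass, dif_neg (by omega)]
      exact (pvKeepWords_clean markers ws (fun w hw => by
        obtain ⟨i, hi, rfl⟩ := List.mem_iff_getElem.mp hw
        exact hclean i hi (by omega))).symm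
  | succ n ih =>
      intro ws idx hle hclean
      by_cases h : idx < ws.length
      · rw [pvSecondPass, dif_pos h]
        by_cases hk : pvHasMarker markers ws[idx] = true
        · -- ws[idx] contains a marker: the fold cuts at idx and the loop then stops
          -- first occurrence of ws[idx] in ws is idx itself (earlier words are clean, hence ≠ ws[idx])
          have hnotpre : ws[idx] ∉ ws.take idx := by
            intro hmem
            obtain ⟨i, hi, hgi⟩ := List.mem_iff_getElem.mp hmem
            have hi' : i < idx := by
              simp only [List.length_take] at hi
              omega
            have : ws[i]'(by omega) = ws[idx] := by
              rw [← hgi]; exact (List.getElem_take).symm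
            have hcl := hclean i (by omega) hi'
            rw [this, hk] at hcl; cases hcl
          have hidx : PySem.List.index? ws ws[idx] = some idx := by
            rw [PySem.List.index?_eq_some_iff]
            refine ⟨ws.take idx, ws.drop (idx + 1), ?_, by simp only [List.length_take]; omega, hnotpre⟩
            conv_lhs => rw [← List.take_append_drop idx ws]
            rw [List.drop_eq_getElem_cons h]
          obtain ⟨j, hj, hin⟩ := List.any_eq_true.mp hk
          rw [pvMarkerFold_cut ws[idx] ws.length markers ws idx ⟨j, hj, hin⟩ hidx rfl h]
          rw [pvSecondPass, dif_neg (by simp only [List.length_take]; omega)]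
          have hcleantake : pvKeepWords markers (ws.take idx) = ws.take idx := by
            refine pvKeepWords_clean markers _ (fun w hw => ?_)
            obtain ⟨i, hi, rfl⟩ := List.mem_iff_getElem.mp hw
            have hi' : i < idx := by simp only [List.length_take] at hi; omega
            have hgt : (ws.take idx)[i] = ws[i]'(by omega) := List.getElem_take
            rw [hgt]
            exact hclean i (by omega) hi'
          rw [← pvKeepWords_take markers ws idx h hk, hcleantake]
        · -- ws[idx] is clean: the fold is the identity, move on
          simp only [Bool.not_eq_true] at hk
          have hcl : ∀ j ∈ markers, PySem.Str.isIn j ws[idx] = false := by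
            intro j hj
            by_contra hcon
            simp only [Bool.not_eq_false] at hcon
            have : pvHasMarker markers ws[idx] = true := List.any_eq_true.mpr ⟨j, hj, hcon⟩
            rw [this] at hk; cases hk
          rw [pvMarkerFold_clean ws[idx] ws.length markers ws hcl]
          exact ih ws (idx + 1) (by omega) (fun i hi hlt => by
            rcases Nat.lt_succ_iff_lt_or_eq.mp hlt with h' | rfl
            · exact hclean i hi h'
            · exact hk)
      · rw [pvSecondPass, dif_neg h]
        exact (pvKeepWords_clean markers ws (fun w hw => by
          obtain ⟨i, hi, rfl⟩ := List.mem_iff_getElem.mp hw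
          exact hclean i hi (by omega))).symm

-- per line: A's two passes equal B's single kept-words scan
theorem pvLine_eq (markers : List String) (words : List String) :
    pvSecondPass markers (pvExactPass words markers) 0 = pvKeepWords markers words := by
  rw [pvSecondPass_eq_keep markers (pvExactPass words markers).length _ 0 (by omega)
    (fun i hi hlt => by omega)]
  exact pvExactPass_keep markers markers words (fun j hj => hj)

-- ===== VERDICT (by name: the statement is the Claim_ definition above) =====
theorem solution_spec : Claim_equal_solution := by
  intro string markers _
  simp only [Spec_solution, solution, solution_alt]
  rw [PySem.List.foldl_append_singleton_eq_map]
  simp only [List.nil_append, pvLine_eq]
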